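-- pv_equiv track=rewrite | github.com/coingraham/adventofcode | 2020/day7.py | walk_relationship_alt
-- ===== SOURCE A (Python) =====
-- def walk_relationship_alt(relationships, starting_point_bag):
--     bag_list = []
--     if starting_point_bag in relationships.keys():
--         for child_bag in relationships[starting_point_bag]:
--             color = child_bag[0]
--             if color not in bag_list:
--                 bag_list.append(color)
--                 bag_list.extend(walk_relationship_alt(relationships, color))
--
--     return bag_list
-- ===== SOURCE B (Python) =====
-- def walk_relationship_alt(relationships, starting_point_bag):
--     # Memoized DFS: the subtree list for each color is a pure function of the
--     # color, so compute it once and reuse it (dynamic programming over colors).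
--     cache = {}
--
--     def walk(color):
--         if color in cache:
--             return cache[color]
--         result = []
--         for child_bag in relationships.get(color, ()):
--             child = child_bag[0]
--             if child not in result:
--                 result.append(child)
--                 result.extend(walk(child))
--         cache[color] = result
--         return result
--
--     return walk(starting_point_bag)
-- ===== Notes on version B (the rewrite author's own statement) =====
-- stated objective: alternative
-- what changed: B memoizes the per-color subtree walk in a cache dict (the walk result is a pure function of the color), so each color's descendant list is computed once and reused instead of being recomputed on every visit as in A's naive recursion.
import Mathlib
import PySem

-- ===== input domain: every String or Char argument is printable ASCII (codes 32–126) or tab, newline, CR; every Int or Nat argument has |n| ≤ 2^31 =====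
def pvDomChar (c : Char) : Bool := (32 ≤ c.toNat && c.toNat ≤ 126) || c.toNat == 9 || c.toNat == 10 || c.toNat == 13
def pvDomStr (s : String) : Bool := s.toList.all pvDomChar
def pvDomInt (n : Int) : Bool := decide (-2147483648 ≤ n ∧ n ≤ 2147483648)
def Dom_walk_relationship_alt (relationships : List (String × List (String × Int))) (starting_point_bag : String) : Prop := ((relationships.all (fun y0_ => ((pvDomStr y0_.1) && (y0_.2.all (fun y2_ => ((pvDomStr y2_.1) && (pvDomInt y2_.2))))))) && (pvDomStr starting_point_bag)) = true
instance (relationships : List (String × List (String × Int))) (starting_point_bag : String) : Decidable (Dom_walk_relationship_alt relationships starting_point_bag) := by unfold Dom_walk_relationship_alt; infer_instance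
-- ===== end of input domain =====

-- B replaces A's naive recursion (which re-walks a color's subtree on every visit) by
-- memoization: each color's descendant list is computed once and cached.  Return-value
-- equivalence is proved on Pre_ (the inputs where Python's unbounded recursion terminates).

-- ===== PORT A =====
-- Python's recursion is unbounded; the port carries a fuel argument that Pre_ proves
-- sufficient (fuel relationships.length + 1 dominates every path length on Pre_ inputs);
-- this is only a totality guard, the computation is A's line for line.
def pvWalkA (relationships : List (String × List (String × Int))) : Nat → String → List String
  | 0, _ => []                                      -- unreachable on Pre_ inputs
  | f + 1, starting_point_bag =>
    match (PySem.Dict.mk relationships).get? starting_point_bag with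
    | none => []                                    -- 'starting_point_bag in relationships.keys()' is False
    | some children =>
      children.foldl (fun bag_list child_bag =>
        let color := child_bag.1
        if bag_list.contains color then bag_list
        else bag_list ++ color :: pvWalkA relationships f color) []

def walk_relationship_alt (relationships : List (String × List (String × Int))) (starting_point_bag : String) : List String :=
  pvWalkA relationships (relationships.length + 1) starting_point_bag

-- ===== PORT B =====
-- the cache dict is threaded through the recursion exactly as Source B mutates it
def pvWalkB (relationships : List (String × List (String × Int))) : Nat → String → PySem.Dict String (List String) → List String × PySem.Dict String (List String)
  | 0, _, cache => ([], cache)                      -- unreachable on Pre_ inputs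
  | f + 1, color, cache =>
    match cache.get? color with
    | some v => (v, cache)
    | none =>
      let st := ((PySem.Dict.mk relationships).getD color []).foldl
        (fun (p : List String × PySem.Dict String (List String)) child_bag =>
          let child := child_bag.1
          if p.1.contains child then p
          else
            let r := pvWalkB relationships f child p.2
            (p.1 ++ child :: r.1, r.2)) ([], cache)
      (st.1, st.2.insert color st.1)

def walk_relationship_alt_alt (relationships : List (String × List (String × Int))) (starting_point_bag : String) : List String :=
  (pvWalkB relationships (relationships.length + 1) starting_point_bag PySem.Dict.empty).1

-- ===== PRECONDITION & SPEC =====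
-- successors of a color in the relationship graph
def pvSuccs (relationships : List (String × List (String × Int))) (c : String) : List String :=
  ((PySem.Dict.mk relationships).getD c []).map Prod.fst

-- colors reachable from the start in exactly n steps (deduplicated BFS level)
def pvLevel (relationships : List (String × List (String × Int))) (starting_point_bag : String) : Nat → List String
  | 0 => [starting_point_bag]
  | n + 1 => ((pvLevel relationships starting_point_bag n).flatMap (pvSuccs relationships)).dedup

-- Pre_: no directed path from the start longer than the number of rules, i.e. no cycle is
-- reachable from the start — exactly the inputs on which Python A's recursion terminates.
def Pre_walk_relationship_alt (relationships : List (String × List (String × Int))) (starting_point_bag : String) : Prop :=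
  pvLevel relationships starting_point_bag (relationships.length + 1) = []

instance (relationships : List (String × List (String × Int))) (starting_point_bag : String) : Decidable (Pre_walk_relationship_alt relationships starting_point_bag) := by
  unfold Pre_walk_relationship_alt; infer_instance

def pvWitness_walk_relationship_alt : (List (String × List (String × Int))) × String :=
  ([("shiny gold", [("dark olive", 3), ("vibrant plum", 4)]), ("dark olive", [("faded blue", 1)])], "shiny gold")

def Spec_walk_relationship_alt (relationships : List (String × List (String × Int))) (starting_point_bag : String) (out : List String) : Prop := out = walk_relationship_alt_alt relationships starting_point_bag
instance (relationships : List (String × List (String × Int))) (starting_point_bag : String) (out : List String) : Decidable (Spec_walk_relationship_alt relationships starting_point_bag out) := by unfold Spec_walk_relationship_alt; infer_instance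

-- ===== CLAIM (what is proved, stated in full; the proofs are below) =====
def Claim_equal_walk_relationship_alt : Prop := ∀ (relationships : List (String × List (String × Int))) (starting_point_bag : String), Dom_walk_relationship_alt relationships starting_point_bag → Pre_walk_relationship_alt relationships starting_point_bag → Spec_walk_relationship_alt relationships starting_point_bag (walk_relationship_alt relationships starting_point_bag)

-- ===== LEMMAS AND PROOFS =====

-- paths in the relationship graph
def pvIsPath (relationships : List (String × List (String × Int))) : String → List String → Prop
  | _, [] => True
  | c, d :: l => d ∈ pvSuccs relationships c ∧ pvIsPath relationships d l

-- the loop bodies of the two ports, as named functions (definitionally equal to the lambdas)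
def pvStepA (g : String → List String) : List String → String × Int → List String :=
  fun bag cb => if bag.contains cb.1 then bag else bag ++ cb.1 :: g cb.1

def pvStepB (relationships : List (String × List (String × Int))) (a : Nat) :
    List String × PySem.Dict String (List String) → String × Int → List String × PySem.Dict String (List String) :=
  fun p cb => if p.1.contains cb.1 then p
    else (p.1 ++ cb.1 :: (pvWalkB relationships a cb.1 p.2).1, (pvWalkB relationships a cb.1 p.2).2)

lemma pvWalkA_succ (relationships : List (String × List (String × Int))) (f : Nat) (c : String) :
    pvWalkA relationships (f + 1) c =
      match (PySem.Dict.mk relationships).get? c with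
      | none => []
      | some children => children.foldl (pvStepA (pvWalkA relationships f)) [] := rfl

lemma pvWalkB_succ (relationships : List (String × List (String × Int))) (f : Nat) (c : String)
    (cache : PySem.Dict String (List String)) :
    pvWalkB relationships (f + 1) c cache =
      match cache.get? c with
      | some v => (v, cache)
      | none =>
        let st := ((PySem.Dict.mk relationships).getD c []).foldl (pvStepB relationships f) ([], cache)
        (st.1, st.2.insert c st.1) := rfl

lemma pvLevel_step {relationships : List (String × List (String × Int))} {start c d : String} {n : Nat}
    (hc : c ∈ pvLevel relationships start n) (hd : d ∈ pvSuccs relationships c) :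
    d ∈ pvLevel relationships start (n + 1) := by
  simp only [pvLevel, List.mem_dedup, List.mem_flatMap]
  exact ⟨c, hc, hd⟩

lemma pvLevel_empty_mono {relationships : List (String × List (String × Int))} {start : String} {n : Nat}
    (h : pvLevel relationships start n = []) : ∀ m, n ≤ m → pvLevel relationships start m = [] := by
  intro m hm
  induction m with
  | zero => exact (Nat.le_zero.mp hm) ▸ h
  | succ k ih =>
    rcases Nat.lt_or_ge n (k + 1) with hlt | hge
    · have hk : pvLevel relationships start k = [] := ih (Nat.lt_succ_iff.mp hlt)
      simp [pvLevel, hk]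
    · exact (Nat.le_antisymm hm hge) ▸ h

lemma pvPath_level {relationships : List (String × List (String × Int))} {start : String} :
    ∀ (l : List String) (c : String) (n : Nat), c ∈ pvLevel relationships start n →
      pvIsPath relationships c l → ∀ (i : Nat) (h : i < l.length), l[i] ∈ pvLevel relationships start (n + i + 1) := by
  intro l
  induction l with
  | nil => intro _ _ _ _ i h; simp at h
  | cons e rest ih =>
    intro c n hc hp i h
    obtain ⟨he, hrest⟩ := hp
    have he' : e ∈ pvLevel relationships start (n + 1) := pvLevel_step hc he
    cases i with
    | zero => simpa using he'
    | succ j =>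
      have hj : j < rest.length := Nat.lt_of_succ_lt_succ (by simpa using h)
      have h2 := ih e (n + 1) he' hrest j hj
      simpa [Nat.add_assoc, Nat.add_comm, Nat.add_left_comm] using h2

-- under Pre_, every path from a reachable color is short
lemma pvPath_bound {relationships : List (String × List (String × Int))} {start : String}
    (hpre : Pre_walk_relationship_alt relationships start) :
    ∀ (c : String) (n : Nat), c ∈ pvLevel relationships start n →
      ∀ l, pvIsPath relationships c l → n + l.length ≤ relationships.length := by
  intro c n hc l hp
  by_contra hgt
  rw [Nat.not_le] at hgt
  cases l with
  | nil =>
    simp only [List.length_nil, Nat.add_zero] at hgt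
    have := pvLevel_empty_mono hpre n (by omega)
    rw [this] at hc; simp at hc
  | cons e rest =>
    simp only [List.length_cons] at hgt
    have hlt : (e :: rest).length - 1 < (e :: rest).length := by simp
    have hlast := pvPath_level (e :: rest) c n hc hp ((e :: rest).length - 1) hlt
    have hE : pvLevel relationships start (n + ((e :: rest).length - 1) + 1) = [] :=
      pvLevel_empty_mono hpre _ (by simp only [List.length_cons]; omega)
    rw [hE] at hlast; simp at hlast

-- fold congruence for A's loop body
lemma pvFoldA_congr {g g' : String → List String} :
    ∀ (cs : List (String × Int)), (∀ ch ∈ cs, g ch.1 = g' ch.1) →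
      ∀ (acc : List String), cs.foldl (pvStepA g) acc = cs.foldl (pvStepA g') acc := by
  intro cs
  induction cs with
  | nil => intro _ _; rfl
  | cons ch rest ih =>
    intro hall acc
    simp only [List.foldl_cons]
    have hstep : pvStepA g acc ch = pvStepA g' acc ch := by
      simp only [pvStepA, hall ch (by simp)]
    rw [hstep]
    exact ih (fun c hc => hall c (by simp [hc])) _

lemma pvSuccs_of_get? {relationships : List (String × List (String × Int))} {c : String}
    {children : List (String × Int)}
    (hget : (PySem.Dict.mk relationships).get? c = some children) :
    ∀ ch ∈ children, ch.1 ∈ pvSuccs relationships c := by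
  intro ch hch
  simp only [pvSuccs, PySem.Dict.getD_eq_get?_getD, hget, Option.getD_some]
  exact List.mem_map_of_mem hch

-- fuel independence: with enough fuel for every path, the value does not depend on the fuel
lemma pvWalkA_fuel {relationships : List (String × List (String × Int))} :
    ∀ (f₁ f₂ : Nat) (c : String),
      (∀ l, pvIsPath relationships c l → l.length < f₁) →
      (∀ l, pvIsPath relationships c l → l.length < f₂) →
      pvWalkA relationships f₁ c = pvWalkA relationships f₂ c := by
  intro f₁
  induction f₁ with
  | zero => intro f₂ c h₁ _; exact absurd (h₁ [] trivial) (by simp)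
  | succ a ih =>
    intro f₂ c h₁ h₂
    cases f₂ with
    | zero => exact absurd (h₂ [] trivial) (by simp)
    | succ b =>
      rw [pvWalkA_succ, pvWalkA_succ]
      cases hget : (PySem.Dict.mk relationships).get? c with
      | none => rfl
      | some children =>
        refine pvFoldA_congr children (fun ch hch => ?_) []
        have hsucc : ch.1 ∈ pvSuccs relationships c := pvSuccs_of_get? hget ch hch
        refine ih b ch.1 (fun l hl => ?_) (fun l hl => ?_)
        · have := h₁ (ch.1 :: l) ⟨hsucc, hl⟩
          simp only [List.length_cons] at this; omega
        · have := h₂ (ch.1 :: l) ⟨hsucc, hl⟩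
          simp only [List.length_cons] at this; omega

-- the cache invariant: every stored value is the true (A-side) walk of its key
def pvCacheOK (relationships : List (String × List (String × Int))) (cache : PySem.Dict String (List String)) : Prop :=
  ∀ k v, cache.get? k = some v → v = pvWalkA relationships (relationships.length + 1) k

lemma pvCacheOK_insert {relationships : List (String × List (String × Int))}
    {cache : PySem.Dict String (List String)} {c : String} {v : List String}
    (hok : pvCacheOK relationships cache)
    (hv : v = pvWalkA relationships (relationships.length + 1) c) :
    pvCacheOK relationships (cache.insert c v) := by
  intro k w hkw
  rw [PySem.Dict.get?_insert] at hkw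
  split at hkw
  · rename_i hkc; cases hkw; subst hkc; exact hv
  · exact hok k w hkw

-- main lemma: the memoized walk agrees with A's walk and preserves the invariant
lemma pvWalkB_correct {relationships : List (String × List (String × Int))} {start : String}
    (hpre : Pre_walk_relationship_alt relationships start) :
    ∀ (f : Nat) (c : String) (n : Nat) (cache : PySem.Dict String (List String)),
      c ∈ pvLevel relationships start n →
      (∀ l, pvIsPath relationships c l → l.length < f) →
      pvCacheOK relationships cache →
      (pvWalkB relationships f c cache).1 = pvWalkA relationships (relationships.length + 1) c ∧
      pvCacheOK relationships (pvWalkB relationships f c cache).2 := by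
  intro f
  induction f with
  | zero => intro c n cache _ hb _; exact absurd (hb [] trivial) (by simp)
  | succ a ih =>
    intro c n cache hc hb hok
    rw [pvWalkB_succ]
    cases hhit : cache.get? c with
    | some v => exact ⟨hok c v hhit, hok⟩
    | none =>
      -- the children loop: the list component follows A's loop (with canonical fuel), the cache stays OK
      have hfold : ∀ (cs : List (String × Int)), (∀ ch ∈ cs, ch.1 ∈ pvSuccs relationships c) →
          ∀ (acc : List String) (cc : PySem.Dict String (List String)), pvCacheOK relationships cc →
            (cs.foldl (pvStepB relationships a) (acc, cc)).1
              = cs.foldl (pvStepA (pvWalkA relationships (relationships.length + 1))) acc ∧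
            pvCacheOK relationships (cs.foldl (pvStepB relationships a) (acc, cc)).2 := by
        intro cs
        induction cs with
        | nil => intro _ acc cc hcc; exact ⟨rfl, hcc⟩
        | cons ch rest ihcs =>
          intro hall acc cc hcc
          simp only [List.foldl_cons]
          by_cases hmem : acc.contains ch.1
          · have hB : pvStepB relationships a (acc, cc) ch = (acc, cc) := by
              simp only [pvStepB, hmem, if_true]
            have hA : pvStepA (pvWalkA relationships (relationships.length + 1)) acc ch = acc := by
              simp only [pvStepA, hmem, if_true]
            rw [hB, hA]
            exact ihcs (fun x hx => hall x (List.mem_cons_of_mem _ hx)) acc cc hcc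
          · have hchsucc : ch.1 ∈ pvSuccs relationships c := hall ch List.mem_cons_self
            have hchlvl : ch.1 ∈ pvLevel relationships start (n + 1) := pvLevel_step hc hchsucc
            have hchb : ∀ l, pvIsPath relationships ch.1 l → l.length < a := fun l hl => by
              have := hb (ch.1 :: l) ⟨hchsucc, hl⟩
              simp only [List.length_cons] at this; omega
            obtain ⟨hv, hok'⟩ := ih ch.1 (n + 1) cc hchlvl hchb hcc
            have hB : pvStepB relationships a (acc, cc) ch
                = (acc ++ ch.1 :: (pvWalkB relationships a ch.1 cc).1, (pvWalkB relationships a ch.1 cc).2) := by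
              simp only [pvStepB, hmem, if_false, Bool.false_eq_true]
            have hA : pvStepA (pvWalkA relationships (relationships.length + 1)) acc ch
                = acc ++ ch.1 :: pvWalkA relationships (relationships.length + 1) ch.1 := by
              simp only [pvStepA, hmem, if_false, Bool.false_eq_true]
            rw [hB, hA, hv]
            exact ihcs (fun x hx => hall x (List.mem_cons_of_mem _ hx)) _ _ hok'
      -- A's value with one unfolding, recursive calls realigned to the canonical fuel
      have hA : pvWalkA relationships (relationships.length + 1) c
          = ((PySem.Dict.mk relationships).getD c []).foldl
              (pvStepA (pvWalkA relationships (relationships.length + 1))) [] := by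
        rw [pvWalkA_succ]
        cases hget : (PySem.Dict.mk relationships).get? c with
        | none => simp [PySem.Dict.getD_eq_get?_getD, hget]
        | some children =>
          have hgd : (PySem.Dict.mk relationships).getD c [] = children := by
            rw [PySem.Dict.getD_eq_get?_getD, hget]; rfl
          rw [hgd]
          refine pvFoldA_congr children (fun ch hch => ?_) []
          have hchsucc := pvSuccs_of_get? hget ch hch
          refine pvWalkA_fuel relationships.length (relationships.length + 1) ch.1 (fun l hl => ?_) (fun l hl => ?_)
          · have := pvPath_bound hpre ch.1 (n + 1) (pvLevel_step hc hchsucc) l hl; omega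
          · have := pvPath_bound hpre ch.1 (n + 1) (pvLevel_step hc hchsucc) l hl; omega
      have hallgd : ∀ ch ∈ (PySem.Dict.mk relationships).getD c [], ch.1 ∈ pvSuccs relationships c := by
        intro ch hch
        simp only [pvSuccs]
        exact List.mem_map_of_mem hch
      obtain ⟨h1, h2⟩ := hfold ((PySem.Dict.mk relationships).getD c []) hallgd [] cache hok
      exact ⟨by rw [h1, ← hA], pvCacheOK_insert h2 (by rw [h1, ← hA])⟩

-- ===== VERDICT (by name: the statement is the Claim_ definition above) =====
theorem walk_relationship_alt_spec : Claim_equal_walk_relationship_alt := by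
  intro relationships start _ hpre
  unfold Spec_walk_relationship_alt walk_relationship_alt walk_relationship_alt_alt
  have hb : ∀ l, pvIsPath relationships start l → l.length < relationships.length + 1 := fun l hl => by
    have := pvPath_bound hpre start 0 (by simp [pvLevel]) l hl; omega
  have hok : pvCacheOK relationships PySem.Dict.empty := by
    intro k v hkv; rw [PySem.Dict.get?_empty] at hkv; cases hkv
  obtain ⟨h1, _⟩ := pvWalkB_correct hpre (relationships.length + 1) start 0 PySem.Dict.empty (by simp [pvLevel]) hb hok
  exact h1.symm
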